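-- pv_equiv track=rewrite | github.com/ArpadGBondor/Codewars_Solutions | Python/6 kyu/0016.py | sc
-- ===== SOURCE A (Python) =====
-- import math
-- import math
--
-- def sc(room):
--     elements: list[str] = []
--     for i, row in enumerate(room):
--         for j, element in enumerate(row):
--             if not (element == " "):
--                 elements.append(element)
--
--     number_of_elements = len(elements)
--     sorted_size: int = int(math.ceil(math.sqrt(number_of_elements)))
--
--     res: list[list[str]] = []
--     elements_index: int = 0
--
--     for i in range(len(room)):
--         res.append([])
--         for j in range(len(room)):
--             if j < sorted_size and elements_index < number_of_elements:
--                 res[i].append(elements[elements_index])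
--                 elements_index += 1
--             else:
--                 res[i].append(" ")
--     return res
-- ===== SOURCE B (Python) =====
-- import math
--
-- def sc(room):
--     elems = [e for row in room for e in row if e != " "]
--     n = len(room)
--     w = min(int(math.ceil(math.sqrt(len(elems)))), n)
--     rows = []
--     k = 0
--     while w > 0 and k < len(elems):
--         rows.append(elems[k:k + w])
--         k += w
--     rows = rows[:n]
--     return [r + [" "] * (n - len(r)) for r in rows] + \
--            [[" "] * n for _ in range(n - len(rows))]
-- ===== Notes on version B (the rewrite author's own statement) =====
-- stated objective: alternative
-- what changed: B replaces A's cell-by-cell nested scan with a running elements_index by a staged build: it slices the flat non-space element list into consecutive width-w chunk rows (w = min(ceil(sqrt(count)), n)) with a simple slicing loop, truncates to n rows, pads each row with spaces to length n and appends all-blank rows; no per-cell conditional or mutable counter remains.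
import Mathlib
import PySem

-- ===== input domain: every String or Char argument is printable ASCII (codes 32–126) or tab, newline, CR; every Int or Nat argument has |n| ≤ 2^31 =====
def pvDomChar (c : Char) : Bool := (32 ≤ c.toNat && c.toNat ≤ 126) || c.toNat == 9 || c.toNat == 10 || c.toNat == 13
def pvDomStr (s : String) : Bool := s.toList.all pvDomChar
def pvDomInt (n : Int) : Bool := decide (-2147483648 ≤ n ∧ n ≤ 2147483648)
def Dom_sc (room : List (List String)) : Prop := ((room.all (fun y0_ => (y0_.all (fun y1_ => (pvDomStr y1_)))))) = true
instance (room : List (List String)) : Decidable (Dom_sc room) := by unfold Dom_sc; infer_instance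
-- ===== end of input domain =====

-- B replaces A's cell-by-cell conditional fill with a running index by a staged build:
-- slice the flat element list into width-w chunk rows, pad each row, append blank rows.

-- int(math.ceil(math.sqrt(k))): exact on every feasible element count (both programs call it identically)
def ceilSqrtNat (k : Nat) : Nat :=
  if Nat.sqrt k * Nat.sqrt k = k then Nat.sqrt k else Nat.sqrt k + 1

-- ===== PORT A =====
-- inner loop body: one cell of row i (append element and advance index, or append " ")
def scInner (elements : List String) (cnt size : Nat) (q : List String × Nat) (j : Nat) :
    List String × Nat :=
  if j < size ∧ q.2 < cnt then (q.1 ++ [elements.getD q.2 " "], q.2 + 1)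
  else (q.1 ++ [" "], q.2)

-- outer loop body: build row i cell by cell, threading elements_index
def scOuter (elements : List String) (cnt size n : Nat)
    (st : List (List String) × Nat) (_i : Nat) : List (List String) × Nat :=
  let p := (List.range n).foldl (scInner elements cnt size) ([], st.2)
  (st.1 ++ [p.1], p.2)

def sc (room : List (List String)) : List (List String) :=
  let elements := room.foldl
    (fun acc row => row.foldl (fun acc2 e => if e = " " then acc2 else acc2 ++ [e]) acc) []
  let cnt := elements.length
  let size := ceilSqrtNat cnt
  let n := room.length
  ((List.range n).foldl (scOuter elements cnt size n) ([], 0)).1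

-- ===== PORT B =====
-- the while loop: while w > 0 and k < len(elems): rows.append(elems[k:k+w]); k += w
-- (elems[k:k+w] with natural k is (elems.drop k).take w — exact, cf. PySem.List.slice_natCast_add)
def chunksLoop (w : Nat) (elems : List String) (k : Nat) (acc : List (List String)) :
    List (List String) :=
  if h : 0 < w ∧ k < elems.length then
    chunksLoop w elems (k + w) (acc ++ [(elems.drop k).take w])
  else acc
termination_by elems.length - k
decreasing_by omega

-- r + [" "] * (n - len(r))
def padRow (n : Nat) (r : List String) : List String :=
  r ++ List.replicate (n - r.length) " "

def sc_alt (room : List (List String)) : List (List String) :=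
  let elems := room.flatMap (fun row => row.filter (fun e => e != " "))
  let n := room.length
  let w := min (ceilSqrtNat elems.length) n
  let rows := (chunksLoop w elems 0 []).take n
  rows.map (padRow n) ++ List.replicate (n - rows.length) (List.replicate n " ")

-- ===== PRECONDITION & SPEC =====
def Spec_sc (room : List (List String)) (out : List (List String)) : Prop := out = sc_alt room
instance (room : List (List String)) (out : List (List String)) : Decidable (Spec_sc room out) := by unfold Spec_sc; infer_instance

-- ===== CLAIM (what is proved, stated in full; the proofs are below) =====
def Claim_equal_sc : Prop := ∀ (room : List (List String)), Dom_sc room → Spec_sc room (sc room)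

-- ===== LEMMAS AND PROOFS =====

-- proof-only structural view of the chunking loop: consecutive width-w slices
def chunks (w : Nat) (elems : List String) : List (List String) :=
  if _h : elems = [] ∨ w = 0 then []
  else elems.take w :: chunks w (elems.drop w)
termination_by elems.length
decreasing_by
  have h1 : 0 < elems.length := List.length_pos_iff.mpr (by tauto)
  simp only [List.length_drop]
  omega

-- the accumulator while-loop computes exactly the structural chunks of the unread suffix
theorem chunksLoop_eq_aux (w : Nat) (elems : List String) :
    ∀ (d k : Nat) (acc : List (List String)), elems.length - k ≤ d →
      chunksLoop w elems k acc = acc ++ chunks w (elems.drop k) := by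
  intro d
  induction d with
  | zero =>
      intro k acc hd
      rw [chunksLoop, dif_neg (by omega)]
      have hdrop : elems.drop k = [] := List.drop_eq_nil_of_le (by omega)
      rw [hdrop, chunks, dif_pos (Or.inl rfl), List.append_nil]
  | succ d ih =>
      intro k acc hd
      rw [chunksLoop]
      split
      · rename_i h
        have hne : elems.drop k ≠ [] := by
          intro hnil
          have := congrArg List.length hnil
          simp only [List.length_drop, List.length_nil] at this
          omega
        have hcond : ¬(elems.drop k = [] ∨ w = 0) := by
          push_neg
          exact ⟨hne, by omega⟩
        conv_rhs => rw [chunks, dif_neg hcond]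
        rw [ih (k + w) _ (by omega), List.drop_drop, List.append_assoc,
          List.singleton_append]
      · rename_i h
        rcases Decidable.not_and_iff_not_or_not.mp h with h1 | h2
        · have hw : w = 0 := by omega
          rw [chunks, dif_pos (Or.inr hw), List.append_nil]
        · have hdrop : elems.drop k = [] := List.drop_eq_nil_of_le (by omega)
          rw [hdrop, chunks, dif_pos (Or.inl rfl), List.append_nil]

theorem chunksLoop_eq (w : Nat) (elems : List String) :
    chunksLoop w elems 0 [] = chunks w elems := by
  rw [chunksLoop_eq_aux w elems elems.length 0 [] (by omega)]
  simp

-- A's element-collection fold equals B's filter, row by row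
theorem scRow_filter (row acc : List String) :
    row.foldl (fun acc2 e => if e = " " then acc2 else acc2 ++ [e]) acc
      = acc ++ row.filter (fun e => e != " ") := by
  induction row generalizing acc with
  | nil => simp
  | cons x xs ih =>
      by_cases hx : x = " " <;> simp [List.foldl_cons, hx, ih]

-- A's nested element-collection fold equals B's flatMap/filter comprehension
theorem scElems_eq (room : List (List String)) (acc : List String) :
    room.foldl
      (fun acc row => row.foldl (fun acc2 e => if e = " " then acc2 else acc2 ++ [e]) acc) acc
      = acc ++ room.flatMap (fun row => row.filter (fun e => e != " ")) := by
  induction room generalizing acc with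
  | nil => simp
  | cons r rs ih => simp [List.foldl_cons, scRow_filter, List.flatMap]

-- characterisation of A's inner loop: the cells it appends and the final index
theorem scInner_fold (elements : List String) (cnt size m idx0 : Nat) (acc : List String) :
    (List.range m).foldl (scInner elements cnt size) (acc, idx0)
      = (acc ++ (List.range m).map
            (fun j => if j < size ∧ idx0 + j < cnt then elements.getD (idx0 + j) " " else " "),
         idx0 + min (min size m) (cnt - idx0)) := by
  induction m with
  | zero => simp
  | succ m ih =>
      rw [List.range_succ, List.foldl_append, ih]
      simp only [List.foldl_cons, List.foldl_nil, List.map_append, List.map_cons, List.map_nil,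
        scInner]
      by_cases h : m < size ∧ idx0 + min (min size m) (cnt - idx0) < cnt
      · have h1 : min (min size m) (cnt - idx0) = m := by omega
        have h2 : idx0 + m < cnt := by omega
        have hc : m < size ∧ idx0 + m < cnt := ⟨h.1, h2⟩
        rw [if_pos h]
        refine Prod.ext ?_ ?_
        · simp only [h1, if_pos hc, List.append_assoc]
        · simp only; omega
      · rw [if_neg h]
        refine Prod.ext ?_ ?_
        · have : ¬ (m < size ∧ idx0 + m < cnt) := by omega
          simp only [if_neg this, List.append_assoc]
        · simp only; omega

-- characterisation of A's outer loop: each row is the inner-loop row starting at min(i*w, cnt)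
theorem scOuter_fold (elements : List String) (cnt size n m : Nat) :
    (List.range m).foldl (scOuter elements cnt size n) ([], 0)
      = ((List.range m).map (fun i => (List.range n).map
            (fun j => if j < size ∧ min (i * min size n) cnt + j < cnt
                      then elements.getD (min (i * min size n) cnt + j) " " else " ")),
         min (m * min size n) cnt) := by
  induction m with
  | zero => simp
  | succ m ih =>
      rw [List.range_succ, List.foldl_append, ih]
      simp only [List.foldl_cons, List.foldl_nil, List.map_append, List.map_cons, List.map_nil,
        scOuter, scInner_fold]
      refine Prod.ext ?_ ?_
      · rfl
      · simp only
        have hs : (m + 1) * min size n = m * min size n + min size n := by ring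
        generalize m * min size n = a at *
        rw [hs]; omega

-- the two per-cell formulas agree for columns j < n
theorem scCell_eq (elements : List String) (cnt size n i j : Nat) (hj : j < n) :
    (if j < size ∧ min (i * min size n) cnt + j < cnt
     then elements.getD (min (i * min size n) cnt + j) " " else " ")
      = (if j < min size n ∧ i * min size n + j < cnt
         then elements.getD (i * min size n + j) " " else " ") := by
  rcases Nat.le_total (i * min size n) cnt with h | h
  · rw [Nat.min_eq_left h]
    split_ifs with h1 h2 <;> first | rfl | omega
  · rw [Nat.min_eq_right h]
    split_ifs with h1 h2 <;> first | rfl | omega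

-- padding a short row equals reading it cell by cell with default " "
theorem pad_eq (xs : List String) : ∀ n : Nat, xs.length ≤ n →
    padRow n xs = (List.range n).map (fun j => xs.getD j " ") := by
  induction xs with
  | nil =>
      intro n _
      simp [padRow, List.map_const']
  | cons x xs ih =>
      intro n hn
      cases n with
      | zero => simp at hn
      | succ n =>
          rw [List.range_succ_eq_map, List.map_cons, List.map_map]
          simp only [List.getD_cons_zero, Function.comp_def, Nat.succ_eq_add_one,
            List.getD_cons_succ]
          have := ih n (by simpa using hn)
          simpa [padRow] using congrArg (List.cons x) this

theorem getD_take (l : List String) (w j : Nat) (d : String) :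
    (l.take w).getD j d = if j < w ∧ j < l.length then l.getD j d else d := by
  by_cases hw : j < w
  · by_cases hl : j < l.length
    · simp [List.getD, List.getElem?_take, hw, hl]
    · have hnone : l[j]? = none := List.getElem?_eq_none (by omega)
      simp [List.getD, List.getElem?_take, hw, hl, hnone]
  · simp [List.getD, List.getElem?_take, hw]

theorem getD_drop (l : List String) (w k : Nat) (d : String) :
    (l.drop w).getD k d = l.getD (w + k) d := by
  simp [List.getD, List.getElem?_drop]

-- B's staged build (chunk rows, pad, blank rows) equals the direct per-cell grid
theorem chunks_grid (w n : Nat) (hwn : w ≤ n) :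
    ∀ (m : Nat) (elems : List String), (elems ≠ [] → 0 < w) →
      (((chunks w elems).take m).map (padRow n)
        ++ List.replicate (m - ((chunks w elems).take m).length) (List.replicate n " "))
      = (List.range m).map (fun i => (List.range n).map
          (fun j => if j < w ∧ i * w + j < elems.length then elems.getD (i * w + j) " " else " ")) := by
  intro m
  induction m with
  | zero => intro elems _; simp
  | succ m ih =>
      intro elems hw
      by_cases he : elems = []
      · subst he
        rw [chunks]
        simp [List.map_const']
      · have hw' : 0 < w := hw he
        rw [chunks, dif_neg (by simp [he]; omega)]
        rw [List.take_succ_cons, List.map_cons]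
        have hlen : ((elems.take w :: (chunks w (elems.drop w)).take m)).length
            = ((chunks w (elems.drop w)).take m).length + 1 := by simp
        rw [List.range_succ_eq_map, List.map_cons, List.map_map]
        have hrow0 : padRow n (elems.take w)
            = (List.range n).map
                (fun j => if j < w ∧ 0 * w + j < elems.length
                          then elems.getD (0 * w + j) " " else " ") := by
          rw [pad_eq]
          · refine List.map_congr_left (fun j _ => ?_)
            rw [getD_take]
            simp only [Nat.zero_mul, Nat.zero_add]
          · simp only [List.length_take]; omega
        have htail : (((chunks w (elems.drop w)).take m).map (padRow n)
              ++ List.replicate (m - ((chunks w (elems.drop w)).take m).length)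
                   (List.replicate n " "))
            = (List.range m).map (fun i => (List.range n).map
                (fun j => if j < w ∧ (i + 1) * w + j < elems.length
                          then elems.getD ((i + 1) * w + j) " " else " ")) := by
          rw [ih (elems.drop w) (fun _ => hw')]
          refine List.map_congr_left (fun i _ => ?_)
          refine List.map_congr_left (fun j _ => ?_)
          have hlen' : (elems.drop w).length = elems.length - w := by simp
          have hidx : (i + 1) * w + j = w + (i * w + j) := by ring
          rw [getD_drop, hlen', ← hidx]
          split_ifs with h1 h2 <;> first | rfl | omega
        calc padRow n (elems.take w) ::
              (((chunks w (elems.drop w)).take m).map (padRow n)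
                ++ List.replicate (m + 1 - (((chunks w (elems.drop w)).take m).length + 1))
                     (List.replicate n " "))
            = padRow n (elems.take w) ::
              (((chunks w (elems.drop w)).take m).map (padRow n)
                ++ List.replicate (m - ((chunks w (elems.drop w)).take m).length)
                     (List.replicate n " ")) := by
              rw [Nat.succ_sub_succ]
          _ = _ := by
              rw [htail, hrow0]
              simp [Function.comp_def]

theorem ceilSqrtNat_pos (k : Nat) (hk : 0 < k) : 0 < ceilSqrtNat k := by
  unfold ceilSqrtNat
  split
  · rename_i h
    rcases Nat.eq_zero_or_pos (Nat.sqrt k) with h0 | h0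
    · rw [h0] at h; omega
    · exact h0
  · omega

-- nonempty flattened element list forces a nonempty room
theorem room_ne_of_elems_ne (room : List (List String))
    (h : room.flatMap (fun row => row.filter (fun e => e != " ")) ≠ []) : room ≠ [] := by
  intro hr; subst hr; simp at h

-- ===== VERDICT (by name: the statement is the Claim_ definition above) =====
theorem sc_spec : Claim_equal_sc := by
  intro room _
  show sc room = sc_alt room
  simp only [sc, sc_alt, scElems_eq, List.nil_append, scOuter_fold]
  set elems := room.flatMap (fun row => row.filter (fun e => e != " ")) with helems
  set n := room.length
  set size := ceilSqrtNat elems.length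
  have hA : ((List.range n).map (fun i => (List.range n).map
        (fun j => if j < size ∧ min (i * min size n) elems.length + j < elems.length
                  then elems.getD (min (i * min size n) elems.length + j) " " else " ")))
      = (List.range n).map (fun i => (List.range n).map
        (fun j => if j < min size n ∧ i * min size n + j < elems.length
                  then elems.getD (i * min size n + j) " " else " ")) := by
    refine List.map_congr_left (fun i _ => ?_)
    exact List.map_congr_left (fun j hj => scCell_eq _ _ _ _ _ _ (List.mem_range.mp hj))
  rw [hA, chunksLoop_eq]
  refine Eq.symm (chunks_grid (min size n) n (Nat.min_le_right _ _) n elems ?_)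
  intro hne
  have hn : 0 < n := List.length_pos_iff.mpr (room_ne_of_elems_ne room hne)
  have hc : 0 < elems.length := List.length_pos_iff.mpr hne
  have hs : 0 < size := ceilSqrtNat_pos _ hc
  omega
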